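-- pv_equiv track=rewrite | github.com/Jfelipeper/Tp1_Alumnos_Udesa | Tp1_Bugna/tp1_funciones_Bugna.py | analizar_rachas
-- ===== SOURCE A (Python) =====
-- def analizar_rachas (secuencia, minimo=4):
--     total_rachas_de_4 = 0
--     actual = secuencia[0]
--     largo = 1
--     max_largo = 1
--     max_clima = actual
--
--     for i in secuencia[1:]:
--         if (i == actual):
--             largo += 1
--         else:
--             if (largo >= minimo):
--                 total_rachas_de_4 +=1
--             if (largo > max_largo):
--                 max_largo = largo
--                 max_clima = actual
--
--             actual = i
--             largo = 1
--     if (largo >= minimo):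
--         total_rachas_de_4 +=1
--     if(largo > max_largo):
--         max_largo = largo
--         max_clima = actual
--
--     return total_rachas_de_4, (max_largo, max_clima)
-- ===== SOURCE B (Python) =====
-- def analizar_rachas(secuencia, minimo=4):
--     # Build the run-length encoding first, then take three simple passes over it.
--     runs = []
--     for x in secuencia:
--         if runs and runs[-1][0] == x:
--             runs[-1] = (runs[-1][0], runs[-1][1] + 1)
--         else:
--             runs.append((x, 1))
--     total = 0
--     for _, l in runs:
--         if l >= minimo:
--             total += 1
--     best = (1, runs[0][0])
--     for k, l in runs:
--         if l > best[0]: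
--             best = (l, k)
--     return total, best
-- ===== Notes on version B (the rewrite author's own statement) =====
-- stated objective: alternative
-- what changed: B first builds the run-length encoding of the sequence, then derives the count of long runs and the earliest longest run in separate simple passes over the run list, instead of A's single interleaved state machine with end-of-loop duplication.
import Mathlib
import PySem

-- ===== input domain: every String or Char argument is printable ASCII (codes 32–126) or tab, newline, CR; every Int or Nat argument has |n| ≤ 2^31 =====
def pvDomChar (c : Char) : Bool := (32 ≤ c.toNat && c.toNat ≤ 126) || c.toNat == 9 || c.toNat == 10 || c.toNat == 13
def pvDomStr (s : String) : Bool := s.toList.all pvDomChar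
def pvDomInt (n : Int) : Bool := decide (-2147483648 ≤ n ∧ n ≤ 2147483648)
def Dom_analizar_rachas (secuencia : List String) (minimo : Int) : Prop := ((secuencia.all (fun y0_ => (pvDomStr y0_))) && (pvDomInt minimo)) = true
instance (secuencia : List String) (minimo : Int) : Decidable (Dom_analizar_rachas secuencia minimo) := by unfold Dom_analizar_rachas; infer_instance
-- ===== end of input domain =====

-- B builds the run-length encoding first, then counts and maximizes in separate passes (alternative decomposition, same cost).
-- ===== PORT A =====
-- loop body of A's for-loop, step for step
def pvAStep (minimo : Int) (st : Int × String × Int × Int × String) (i : String) :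
    Int × String × Int × Int × String :=
  match st with
  | (total, actual, largo, maxL, maxC) =>
    if i == actual then (total, actual, largo + 1, maxL, maxC)
    else
      let total' := if largo ≥ minimo then total + 1 else total
      let mm := if largo > maxL then (largo, actual) else (maxL, maxC)
      (total', i, 1, mm.1, mm.2)

def analizar_rachas (secuencia : List String) (minimo : Int) : Int × (Int × String) :=
  match secuencia with
  | [] => (0, (1, ""))  -- Python raises IndexError at secuencia[0]; excluded by Pre_
  | actual0 :: rest =>   -- secuencia[1:] = rest (exact for a nonempty list)
    match rest.foldl (pvAStep minimo) (0, actual0, 1, 1, actual0) with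
    | (total, actual, largo, maxL, maxC) =>
      let total' := if largo ≥ minimo then total + 1 else total
      let mm := if largo > maxL then (largo, actual) else (maxL, maxC)
      (total', mm)

-- ===== PORT B =====
-- Source B's run-building loop: append a fresh run or bump the last run's length
def pvRunStep (runs : List (String × Int)) (x : String) : List (String × Int) :=
  match runs.getLast? with
  | some (k, c) => if k == x then runs.dropLast ++ [(k, c + 1)] else runs ++ [(x, 1)]
  | none => [(x, 1)]

def analizar_rachas_alt (secuencia : List String) (minimo : Int) : Int × (Int × String) :=
  let runs := secuencia.foldl pvRunStep []
  match runs with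
  | [] => (0, (1, ""))  -- Python raises IndexError at runs[0][0]; excluded by Pre_
  | (k0, _) :: _ =>
    let total := runs.foldl (fun (t : Int) r => if r.2 ≥ minimo then t + 1 else t) (0 : Int)
    let best := runs.foldl (fun (b : Int × String) r => if r.2 > b.1 then (r.2, r.1) else b) ((1 : Int), k0)
    (total, best)

-- ===== PRECONDITION & SPEC =====
-- A raises IndexError on the empty list (secuencia[0]); B raises there too.
def Pre_analizar_rachas (secuencia : List String) (minimo : Int) : Prop := secuencia ≠ []
instance (secuencia : List String) (minimo : Int) : Decidable (Pre_analizar_rachas secuencia minimo) := by unfold Pre_analizar_rachas; infer_instance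
def pvWitness_analizar_rachas : List String × Int := (["sol", "sol", "lluvia"], 2)

def Spec_analizar_rachas (secuencia : List String) (minimo : Int) (out : Int × (Int × String)) : Prop := out = analizar_rachas_alt secuencia minimo
instance (secuencia : List String) (minimo : Int) (out : Int × (Int × String)) : Decidable (Spec_analizar_rachas secuencia minimo out) := by unfold Spec_analizar_rachas; infer_instance

-- ===== CLAIM (what is proved, stated in full; the proofs are below) =====
def Claim_equal_analizar_rachas : Prop := ∀ (secuencia : List String) (minimo : Int), Dom_analizar_rachas secuencia minimo → Pre_analizar_rachas secuencia minimo → Spec_analizar_rachas secuencia minimo (analizar_rachas secuencia minimo)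

-- ===== LEMMAS AND PROOFS =====

-- run-length encoding of a^c ++ xs (c ≥ 1): reference shape for both ports
def pvG (a : String) (c : Int) : List String → List (String × Int)
  | [] => [(a, c)]
  | x :: xs => if x == a then pvG a (c + 1) xs else (a, c) :: pvG x 1 xs

theorem pvRunStep_inv (xs : List String) : ∀ (ys : List (String × Int)) (a : String) (c : Int),
    List.foldl pvRunStep (ys ++ [(a, c)]) xs = ys ++ pvG a c xs := by
  induction xs with
  | nil => intro ys a c; simp [pvG]
  | cons x xs ih =>
    intro ys a c
    by_cases h : x == a
    · have : pvRunStep (ys ++ [(a, c)]) x = ys ++ [(a, c + 1)] := by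
        simp [pvRunStep, (by simpa using (beq_iff_eq.mp h).symm : (a == x) = true)]
      simp only [List.foldl_cons, this, ih, pvG, h, if_pos]
    · have hax : (a == x) = false := by
        simp only [beq_eq_false_iff_ne]
        intro e; exact h (by simp [e])
      have hstep : pvRunStep (ys ++ [(a, c)]) x = (ys ++ [(a, c)]) ++ [(x, 1)] := by
        simp [pvRunStep, hax]
      rw [List.foldl_cons, hstep, ih (ys ++ [(a, c)]) x 1]
      simp [pvG, h]

theorem pvG_head (xs : List String) : ∀ (a : String) (c : Int),
    ∃ n t, pvG a c xs = (a, n) :: t := by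
  induction xs with
  | nil => intro a c; exact ⟨c, [], rfl⟩
  | cons x xs ih =>
    intro a c
    by_cases h : x == a
    · obtain ⟨n, t, ht⟩ := ih a (c + 1)
      exact ⟨n, t, by simp [pvG, h, ht]⟩
    · exact ⟨c, pvG x 1 xs, by simp [pvG, h]⟩

-- A's loop + trailing ifs, computed from an arbitrary state, equals B's two passes over pvG
theorem pvA_loop (minimo : Int) (xs : List String) :
    ∀ (total : Int) (a : String) (c mL : Int) (mC : String),
    (match xs.foldl (pvAStep minimo) (total, a, c, mL, mC) with
     | (total, actual, largo, maxL, maxC) =>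
       let total' := if largo ≥ minimo then total + 1 else total
       let mm := if largo > maxL then (largo, actual) else (maxL, maxC)
       (total', mm))
    = ((pvG a c xs).foldl (fun (t : Int) r => if r.2 ≥ minimo then t + 1 else t) total,
       (pvG a c xs).foldl (fun (b : Int × String) r => if r.2 > b.1 then (r.2, r.1) else b) (mL, mC)) := by
  induction xs with
  | nil =>
    intro total a c mL mC
    simp only [List.foldl_nil, pvG, List.foldl_cons]
  | cons x xs ih =>
    intro total a c mL mC
    by_cases h : x == a
    · simp only [List.foldl_cons, pvAStep, h, if_pos, pvG]
      simpa [h] using ih total a (c + 1) mL mC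
    · simp only [List.foldl_cons, pvAStep, if_neg h, pvG]
      by_cases h1 : c ≥ minimo <;> by_cases h2 : c > mL <;>
        simp [h1, h2, ih]

theorem analizar_rachas_spec : Claim_equal_analizar_rachas := by
  intro secuencia minimo _ hpre
  unfold Spec_analizar_rachas
  match secuencia with
  | [] => exact absurd rfl hpre
  | a0 :: rest =>
    show analizar_rachas (a0 :: rest) minimo = analizar_rachas_alt (a0 :: rest) minimo
    have hruns : (a0 :: rest).foldl pvRunStep [] = pvG a0 1 rest := by
      have := pvRunStep_inv rest [] a0 1
      simpa [pvRunStep] using this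
    obtain ⟨n, t, ht⟩ := pvG_head rest a0 1
    have hA := pvA_loop minimo rest 0 a0 1 1 a0
    simp only [analizar_rachas, analizar_rachas_alt, hruns, ht] at hA ⊢
    rw [hA]
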